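-- pv_equiv track=rewrite | github.com/sitaramaprasad-e/Prolifics-Sallimae-scripts | Sallie/tools/export_rules_for_markup.py | format_plain
-- ===== SOURCE A (Python) =====
-- from typing import Any, Dict, List, Iterable, Tuple
--
-- def format_plain(grouped: "OrderedDict[str, List[Dict[str, str]]]") -> str:
--     lines: List[str] = []
--     for code_file, rule_items in grouped.items():
--         lines.append(f"{code_file}:")
--         for item in rule_items:
--             rn = item["rule_name"]
--             cf = item.get("code_function") or ""
--             lines.append(f"{rn} ({cf})" if cf else rn)
--         lines.append("")  # blank line between files
--     # Remove trailing blank if present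
--     while lines and lines[-1] == "":
--         lines.pop()
--     return "\n".join(lines)
-- ===== SOURCE B (Python) =====
-- def format_plain(grouped):
--     def render(item):
--         cf = item.get("code_function") or ""
--         return f'{item["rule_name"]} ({cf})' if cf else item["rule_name"]
--
--     def go(pairs):
--         if not pairs:
--             return ""
--         (code_file, items), rest = pairs[0], pairs[1:]
--         head = code_file + ":"
--         for it in items:
--             head = head + "\n" + render(it)
--         tail = go(rest)
--         return head if not tail else head + "\n\n" + tail
--
--     return go(list(grouped.items()))
-- ===== Notes on version B (the rewrite author's own statement) =====
-- stated objective: alternative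
-- what changed: B recurses over the group list, building each block by direct string concatenation (no intermediate line list, no join) and deciding whether a blank-line separator is needed from whether the recursive tail is empty, so A's blank-line sentinels and trailing while/pop stripping loop disappear.
-- intended difference: When the last file's last rule renders as an empty line (empty rule_name and falsy code_function), A's trailing-blank while loop also eats that rule line (e.g. returns 'f:'), while B keeps it ('f:\n'), which is the intended behaviour since the loop was only meant to drop the blank separator. — e.g. on format_plain([("f", [[("rule_name", "")]])]): A returns "f:", B returns "f:\n"
import Mathlib
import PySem

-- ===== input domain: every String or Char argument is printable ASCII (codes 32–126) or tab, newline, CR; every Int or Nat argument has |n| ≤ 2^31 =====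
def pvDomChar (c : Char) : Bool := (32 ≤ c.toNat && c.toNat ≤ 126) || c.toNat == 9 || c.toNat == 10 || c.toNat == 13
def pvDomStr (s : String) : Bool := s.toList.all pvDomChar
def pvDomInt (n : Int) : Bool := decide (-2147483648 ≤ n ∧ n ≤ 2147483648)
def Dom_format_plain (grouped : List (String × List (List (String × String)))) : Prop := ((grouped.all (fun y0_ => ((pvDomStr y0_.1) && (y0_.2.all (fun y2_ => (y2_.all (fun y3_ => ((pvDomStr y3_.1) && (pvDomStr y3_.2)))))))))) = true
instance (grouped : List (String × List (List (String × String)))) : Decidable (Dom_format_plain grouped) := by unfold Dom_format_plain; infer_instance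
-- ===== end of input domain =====

-- B recurses over the group list, building each block by direct string concatenation (no line
-- list, no join, no blank-line sentinel, no trailing while/pop stripping loop) and decides
-- whether a "\n\n" separator is needed from whether the recursive tail is empty (objective:
-- alternative decomposition); on the corner in D_ below, B intentionally keeps a trailing
-- empty rule line that A's stripping loop eats.

-- ===== PORT A =====
-- dict lookup on the association-list item: first match (item["rule_name"] raises KeyError
-- when absent — those inputs are excluded by Pre_format_plain; the port reads "" there).
def format_plain (grouped : List (String × List (List (String × String)))) : String :=
  let lines : List String := grouped.foldl (fun lines gp =>
    let lines := lines ++ [gp.1 ++ ":"]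
    let lines := gp.2.foldl (fun lines item =>
      let rn := (item.lookup "rule_name").getD ""
      let cf := (item.lookup "code_function").getD ""
      lines ++ [if cf ≠ "" then rn ++ " (" ++ cf ++ ")" else rn]) lines
    lines ++ [""]) []
  -- exact port of `while lines and lines[-1] == "": lines.pop()`
  let lines := (lines.reverse.dropWhile (fun s => s == "")).reverse
  PySem.Str.join "\n" lines

-- ===== PORT B =====
-- Source B's render(item)
def pvRender (item : List (String × String)) : String :=
  let cf := (item.lookup "code_function").getD ""
  if cf ≠ "" then (item.lookup "rule_name").getD "" ++ " (" ++ cf ++ ")"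
  else (item.lookup "rule_name").getD ""

-- Source B's recursive go(pairs)
def pvGo : List (String × List (List (String × String))) → String
  | [] => ""
  | gp :: rest =>
    let head := gp.2.foldl (fun h it => h ++ "\n" ++ pvRender it) (gp.1 ++ ":")
    let tail := pvGo rest
    if tail = "" then head else head ++ "\n\n" ++ tail

def format_plain_alt (grouped : List (String × List (List (String × String)))) : String :=
  pvGo grouped

-- ===== PRECONDITION & SPEC =====
-- Pre_ excludes only inputs where some item lacks the "rule_name" key, on which A raises KeyError.
def Pre_format_plain (grouped : List (String × List (List (String × String)))) : Prop :=
  (grouped.all (fun gp => gp.2.all (fun item => (item.lookup "rule_name").isSome))) = true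
instance (grouped : List (String × List (List (String × String)))) : Decidable (Pre_format_plain grouped) := by unfold Pre_format_plain; infer_instance

def pvWitness_format_plain : (List (String × List (List (String × String)))) :=
  [("f", [[("rule_name", "r"), ("code_function", "g")]])]

-- When the last file's last rule renders as an empty line (empty rule_name and falsy
-- code_function), A's trailing-blank while loop also eats that rule line (e.g. returns "f:"),
-- while B keeps it ("f:\n"), which is the intended behaviour since the loop was only meant to
-- drop the blank separator line between files.
def D_format_plain (grouped : List (String × List (List (String × String)))) : Prop :=
  ((grouped.getLast?.bind (fun gp => gp.2.getLast?)).any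
    (fun item => (item.lookup "rule_name" == some "") &&
                 ((item.lookup "code_function").getD "" == ""))) = true
instance (grouped : List (String × List (List (String × String)))) : Decidable (D_format_plain grouped) := by unfold D_format_plain; infer_instance

def Spec_format_plain (grouped : List (String × List (List (String × String)))) (out : String) : Prop := ¬ D_format_plain grouped → out = format_plain_alt grouped
instance (grouped : List (String × List (List (String × String)))) (out : String) : Decidable (Spec_format_plain grouped out) := by unfold Spec_format_plain; infer_instance

def pvDiffWitness_format_plain : (List (String × List (List (String × String)))) :=
  [("f", [[("rule_name", "")]])]
def pvDiffWitnessOut_format_plain : String × String := ("f:", "f:\n")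

-- ===== CLAIM (what is proved, stated in full; the proofs are below) =====
def Claim_unchanged_format_plain : Prop := ∀ (grouped : List (String × List (List (String × String)))), Dom_format_plain grouped → Pre_format_plain grouped → Spec_format_plain grouped (format_plain grouped)
def Claim_changed_format_plain : Prop := Dom_format_plain (pvDiffWitness_format_plain) ∧ Pre_format_plain (pvDiffWitness_format_plain) ∧ D_format_plain (pvDiffWitness_format_plain) ∧ format_plain (pvDiffWitness_format_plain) = pvDiffWitnessOut_format_plain.1 ∧ format_plain_alt (pvDiffWitness_format_plain) = pvDiffWitnessOut_format_plain.2 ∧ pvDiffWitnessOut_format_plain.1 ≠ pvDiffWitnessOut_format_plain.2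

def Claim_exact_format_plain : Prop := ∀ (grouped : List (String × List (List (String × String)))), Dom_format_plain grouped → Pre_format_plain grouped → D_format_plain grouped → format_plain grouped ≠ format_plain_alt grouped

-- ===== LEMMAS AND PROOFS =====

-- the lines of one block
def pvL (gp : String × List (List (String × String))) : List String :=
  (gp.1 ++ ":") :: gp.2.map pvRender

-- the trailing-blank stripper of port A, named for the proofs
def pvPop (l : List String) : List String := (l.reverse.dropWhile (fun s => s == "")).reverse

lemma pvPop_append_of_ne_nil (xs ys : List String) (h : pvPop ys ≠ []) :
    pvPop (xs ++ ys) = xs ++ pvPop ys := by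
  unfold pvPop at *
  rw [List.reverse_append, List.dropWhile_append]
  split_ifs with hemp
  · exfalso; apply h; rw [List.isEmpty_iff] at hemp; simp [hemp]
  · simp

lemma pvPop_ne_nil_of_mem (xs : List String) (x : String) (hx : x ∈ xs) (hne : x ≠ "") :
    pvPop xs ≠ [] := by
  unfold pvPop
  simp only [ne_eq, List.reverse_eq_nil_iff, List.dropWhile_eq_nil_iff, List.mem_reverse]
  intro h
  have := h x hx
  simp at this
  exact hne this

lemma pvPop_append_last_blank (xs : List String) (h : xs.getLast? ≠ some "") :
    pvPop (xs ++ [""]) = xs := by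
  unfold pvPop
  rw [List.reverse_append]
  simp only [List.reverse_cons, List.reverse_nil, List.nil_append, List.singleton_append,
    List.dropWhile_cons]
  simp only [beq_self_eq_true, if_true]
  cases hxs : xs.reverse with
  | nil => simp [List.reverse_eq_nil_iff.mp hxs]
  | cons y ys =>
    have hy : y ≠ "" := by
      intro hy
      apply h
      rw [List.getLast?_eq_head?_reverse, hxs, hy]
      rfl
    rw [List.dropWhile_cons]
    simp only [beq_iff_eq, if_neg hy]
    rw [← hxs, List.reverse_reverse]

lemma pvStr_join_singleton (sep p : String) : PySem.Str.join sep [p] = p := by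
  apply String.toList_inj.mp
  simp only [PySem.Str.toList_join, List.map_cons, List.map_nil]
  exact PySem.Chars.join_singleton _ _

lemma pvStr_join_cons_cons (sep p q : String) (rest : List String) :
    PySem.Str.join sep (p :: q :: rest) = p ++ sep ++ PySem.Str.join sep (q :: rest) := by
  apply String.toList_inj.mp
  simp only [PySem.Str.toList_join, String.toList_append, List.map_cons]
  exact PySem.Chars.join_cons_cons _ _ _ _

lemma pvStr_join_append (sep : String) (xs ys : List String) (hxs : xs ≠ []) (hys : ys ≠ []) :
    PySem.Str.join sep (xs ++ ys) = PySem.Str.join sep xs ++ sep ++ PySem.Str.join sep ys := by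
  induction xs with
  | nil => exact absurd rfl hxs
  | cons x xs ih =>
    cases xs with
    | nil =>
      cases ys with
      | nil => exact absurd rfl hys
      | cons y ys' =>
        rw [List.singleton_append, pvStr_join_cons_cons, pvStr_join_singleton]
    | cons x' xs' =>
      rw [List.cons_append, List.cons_append, pvStr_join_cons_cons]
      rw [← List.cons_append, ih (by simp), pvStr_join_cons_cons]
      simp [String.append_assoc]

-- join absorbs a separator written inside the first element
lemma pvStr_join_absorb (sep a r : String) (rest : List String) :
    PySem.Str.join sep ((a ++ sep ++ r) :: rest) = a ++ sep ++ PySem.Str.join sep (r :: rest) := by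
  cases rest with
  | nil => rw [pvStr_join_singleton, pvStr_join_singleton]
  | cons q qs =>
    rw [pvStr_join_cons_cons, pvStr_join_cons_cons]
    simp [String.append_assoc]

-- B's inner accumulation loop equals a "\n"-join
lemma pvFold_eq_join (l : List (List (String × String))) (a : String) :
    l.foldl (fun h it => h ++ "\n" ++ pvRender it) a
      = PySem.Str.join "\n" (a :: l.map pvRender) := by
  induction l generalizing a with
  | nil => rw [List.foldl_nil, List.map_nil, pvStr_join_singleton]
  | cons x xs ih =>
    rw [List.foldl_cons, ih, List.map_cons, pvStr_join_cons_cons, ← pvStr_join_absorb]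

lemma pvJoin_len (sep : String) (l : List String) (h : l ≠ []) :
    (PySem.Str.join sep l).toList.length
      = (l.map (fun s => s.toList.length)).sum + sep.toList.length * (l.length - 1) := by
  induction l with
  | nil => exact absurd rfl h
  | cons x xs ih =>
    cases xs with
    | nil => simp [pvStr_join_singleton]
    | cons y ys =>
      rw [pvStr_join_cons_cons]
      simp only [String.toList_append, List.length_append]
      rw [ih (by simp)]
      simp only [List.map_cons, List.sum_cons, List.length_cons,
        Nat.add_sub_cancel, Nat.mul_succ]
      ring

-- B's recursion never returns "" on a nonempty list
lemma pvGo_ne (g : String × List (List (String × String)))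
    (rest : List (String × List (List (String × String)))) : pvGo (g :: rest) ≠ "" := by
  show (let head := g.2.foldl (fun h it => h ++ "\n" ++ pvRender it) (g.1 ++ ":")
        let tail := pvGo rest
        if tail = "" then head else head ++ "\n\n" ++ tail) ≠ ""
  simp only [pvFold_eq_join]
  split_ifs with h
  · intro he
    have hl := congrArg (fun s => s.toList.length) he
    simp only [] at hl
    rw [pvJoin_len _ _ (by simp)] at hl
    simp only [List.map_cons, List.sum_cons, String.toList_append, List.length_append] at hl
    have : (("" : String).toList.length) = 0 := rfl
    have h1 : ((":" : String).toList.length) = 1 := rfl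
    omega
  · intro he
    have hl := congrArg (fun s => s.toList.length) he
    simp only [String.toList_append, List.length_append] at hl
    have h2 : (("\n\n" : String).toList.length) = 2 := rfl
    have : (("" : String).toList.length) = 0 := rfl
    omega

-- bridge: B's recursion equals joining the per-file blocks with a double newline
lemma pvGo_eq_join (grouped : List (String × List (List (String × String)))) :
    pvGo grouped = PySem.Str.join "\n\n" (grouped.map (fun gp => PySem.Str.join "\n" (pvL gp))) := by
  induction grouped with
  | nil => rfl
  | cons g rest ih =>
    show (let head := g.2.foldl (fun h it => h ++ "\n" ++ pvRender it) (g.1 ++ ":")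
          let tail := pvGo rest
          if tail = "" then head else head ++ "\n\n" ++ tail) = _
    simp only [pvFold_eq_join]
    cases rest with
    | nil =>
      rw [show pvGo [] = "" from rfl, if_pos rfl, List.map_cons, List.map_nil,
        pvStr_join_singleton]
      rfl
    | cons g2 rest2 =>
      rw [if_neg (pvGo_ne g2 rest2), ih]
      conv_rhs => rw [List.map_cons, List.map_cons, pvStr_join_cons_cons]
      rfl

-- header line of a block is never blank
lemma pvHeader_ne (s : String) : s ++ ":" ≠ "" := by
  intro h
  have := congrArg String.toList h
  simp [String.toList_append] at this

-- under Pre_ and outside D_, a rendered rule line is not blank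
lemma pvRender_ne (item : List (String × String)) (hpre : (item.lookup "rule_name").isSome)
    (hD : ¬ ((item.lookup "rule_name" == some "") &&
             ((item.lookup "code_function").getD "" == "")) = true) :
    pvRender item ≠ "" := by
  obtain ⟨rn, hrn⟩ := Option.isSome_iff_exists.mp hpre
  show (if (item.lookup "code_function").getD "" ≠ "" then
      (item.lookup "rule_name").getD "" ++ " (" ++ (item.lookup "code_function").getD "" ++ ")"
    else (item.lookup "rule_name").getD "") ≠ ""
  by_cases hcf : (item.lookup "code_function").getD "" = ""
  · rw [if_neg (by simpa using hcf)]
    intro h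
    apply hD
    simp [hrn, hcf]
    rw [hrn] at h
    simpa using h
  · rw [if_pos hcf]
    intro h
    have := congrArg String.toList h
    simp [String.toList_append] at this

-- A's line-building loop produces the flattened blocks with a blank sentinel after each
lemma pvLines_eq (grouped : List (String × List (List (String × String)))) :
    (grouped.foldl (fun lines gp =>
      let lines := lines ++ [gp.1 ++ ":"]
      let lines := gp.2.foldl (fun lines item =>
        let rn := (item.lookup "rule_name").getD ""
        let cf := (item.lookup "code_function").getD ""
        lines ++ [if cf ≠ "" then rn ++ " (" ++ cf ++ ")" else rn]) lines
      lines ++ [""]) []) = grouped.flatMap (fun gp => pvL gp ++ [""]) := by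
  have hfun : (fun (lines : List String) gp =>
      let lines := lines ++ [gp.1 ++ ":"]
      let lines := gp.2.foldl (fun lines item =>
        let rn := (item.lookup "rule_name").getD ""
        let cf := (item.lookup "code_function").getD ""
        lines ++ [if cf ≠ "" then rn ++ " (" ++ cf ++ ")" else rn]) lines
      lines ++ [""]) = (fun (lines : List String)
        (gp : String × List (List (String × String))) => lines ++ (pvL gp ++ [""])) := by
    funext lines gp
    show (lines ++ [gp.1 ++ ":"] |> gp.2.foldl _) ++ [""] = _
    rw [PySem.List.foldl_append_singleton_eq_map]
    simp only [pvL, List.append_assoc, List.cons_append, List.nil_append]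
    rfl
  rw [hfun, PySem.List.foldl_append_eq_flatMap]
  simp

-- main induction: joining the popped sentinel-flattened lines = joining blocks with "\n\n"
lemma pvMain (grouped : List (String × List (List (String × String))))
    (hne : grouped ≠ [])
    (hlast : ∀ gp, grouped.getLast? = some gp → (pvL gp).getLast? ≠ some "") :
    PySem.Str.join "\n" (pvPop (grouped.flatMap (fun gp => pvL gp ++ [""]))) =
    PySem.Str.join "\n\n" (grouped.map (fun gp => PySem.Str.join "\n" (pvL gp))) := by
  induction grouped with
  | nil => exact absurd rfl hne
  | cons g rest ih =>
    cases rest with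
    | nil =>
      have hlastg := hlast g (by simp)
      rw [show ([g] : List (String × List (List (String × String)))).flatMap
            (fun gp => pvL gp ++ [""]) = pvL g ++ [""] by simp]
      rw [pvPop_append_last_blank _ hlastg]
      simp only [List.map_cons, List.map_nil]
      rw [pvStr_join_singleton]
    | cons g2 rest2 =>
      have hlast' : ∀ gp, (g2 :: rest2).getLast? = some gp → (pvL gp).getLast? ≠ some "" := by
        intro gp hgp
        exact hlast gp (by rw [List.getLast?_cons_cons]; exact hgp)
      have ihr := ih (by simp) hlast'
      have hpopne : pvPop ((g2 :: rest2).flatMap (fun gp => pvL gp ++ [""])) ≠ [] := by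
        apply pvPop_ne_nil_of_mem _ (g2.1 ++ ":")
        · simp only [List.mem_flatMap]
          exact ⟨g2, by simp, by simp [pvL]⟩
        · exact pvHeader_ne _
      rw [List.flatMap_cons, pvPop_append_of_ne_nil _ _ hpopne, List.append_assoc]
      obtain ⟨z, zs, hz⟩ := List.exists_cons_of_ne_nil hpopne
      rw [pvStr_join_append "\n" (pvL g) _ (by simp [pvL]) (by simp)]
      rw [hz, List.singleton_append, pvStr_join_cons_cons, ← hz, ihr]
      conv_rhs => rw [List.map_cons, List.map_cons, pvStr_join_cons_cons]
      rw [show ("\n\n" : String) = "\n" ++ "\n" by decide]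
      simp [String.append_assoc]
      rw [show ("\n\n" : String) = "\n" ++ "\n" by decide, String.append_assoc]

lemma pvPop_append_blank (l : List String) : pvPop (l ++ [""]) = pvPop l := by
  unfold pvPop
  rw [List.reverse_append]
  simp

lemma pvPop_prefix_decomp (l : List String) :
    ∃ R, l = pvPop l ++ R ∧ ∀ x ∈ R, x = "" := by
  refine ⟨(l.reverse.takeWhile (fun s => s == "")).reverse, ?_, ?_⟩
  · unfold pvPop
    conv_lhs => rw [← List.reverse_reverse l,
      ← List.takeWhile_append_dropWhile (p := fun s => s == "") (l := l.reverse)]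
    rw [List.reverse_append]
  · intro x hx
    rw [List.mem_reverse] at hx
    have := List.mem_takeWhile_imp hx
    simpa using this

-- B as a "\n"-join of the sentinel-flattened lines without their final sentinel
lemma pvAltMain (grouped : List (String × List (List (String × String))))
    (hne : grouped ≠ []) :
    PySem.Str.join "\n\n" (grouped.map (fun gp => PySem.Str.join "\n" (pvL gp))) =
    PySem.Str.join "\n" ((grouped.flatMap (fun gp => pvL gp ++ [""])).dropLast) := by
  induction grouped with
  | nil => exact absurd rfl hne
  | cons g rest ih =>
    cases rest with
    | nil =>
      rw [show ([g] : List (String × List (List (String × String)))).flatMap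
            (fun gp => pvL gp ++ [""]) = pvL g ++ [""] by simp]
      rw [List.dropLast_concat]
      simp only [List.map_cons, List.map_nil]
      rw [pvStr_join_singleton]
    | cons g2 rest2 =>
      have ihr := ih (by simp)
      have hfr : (g2 :: rest2).flatMap (fun gp => pvL gp ++ [""]) =
          (g2.1 ++ ":") :: ((g2.2.map pvRender ++ [""]) ++
            rest2.flatMap (fun gp => pvL gp ++ [""])) := by
        simp [pvL]
      have hdne : ((g2 :: rest2).flatMap (fun gp => pvL gp ++ [""])).dropLast ≠ [] := by
        rw [hfr, List.dropLast_cons_of_ne_nil (by simp)]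
        simp
      rw [List.flatMap_cons, List.dropLast_append_of_ne_nil (by rw [hfr]; simp),
        List.append_assoc]
      rw [pvStr_join_append "\n" (pvL g) _ (by simp [pvL]) (by simp)]
      obtain ⟨z, zs, hz⟩ := List.exists_cons_of_ne_nil hdne
      rw [hz, List.singleton_append, pvStr_join_cons_cons, ← hz, ← ihr]
      conv_lhs => rw [List.map_cons, List.map_cons, pvStr_join_cons_cons]
      rw [show ("\n\n" : String) = "\n" ++ "\n" by decide]
      simp [String.append_assoc]
      rw [show ("\n\n" : String) = "\n" ++ "\n" by decide, String.append_assoc]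

-- ===== VERDICT (by name: the statement is the Claim_ definition above) =====
theorem format_plain_spec : Claim_unchanged_format_plain := by
  intro grouped _ hpre hnD
  show PySem.Str.join "\n" _ = _
  unfold format_plain_alt
  rw [pvGo_eq_join, pvLines_eq]
  by_cases hg : grouped = []
  · subst hg; rfl
  · have hlast : ∀ gp, grouped.getLast? = some gp → (pvL gp).getLast? ≠ some "" := by
      intro gp hgp
      have hgpmem : gp ∈ grouped := List.mem_of_getLast? hgp
      cases hitems : gp.2 with
      | nil =>
        simp only [pvL, hitems, List.map_nil, List.getLast?_singleton]
        intro h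
        exact pvHeader_ne gp.1 (by injection h)
      | cons i is =>
        have : (pvL gp).getLast? = some (pvRender ((i :: is).getLast (by simp))) := by
          simp only [pvL, hitems, List.map_cons]
          rw [List.getLast?_cons_cons, ← List.map_cons, List.getLast?_map,
            List.getLast?_eq_some_getLast (by simp)]
          rfl
        rw [this]
        intro h
        have hlitem := List.getLast_mem (l := i :: is) (by simp)
        set litem := (i :: is).getLast (by simp) with hlit
        have hpreitem : (litem.lookup "rule_name").isSome := by
          simp only [Pre_format_plain, List.all_eq_true] at hpre
          have := hpre gp hgpmem
          have := this litem (by rw [hitems]; exact hlitem)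
          simpa using this
        have hDitem : ¬ ((litem.lookup "rule_name" == some "") &&
            ((litem.lookup "code_function").getD "" == "")) = true := by
          intro hb
          apply hnD
          unfold D_format_plain
          have h2 : gp.2.getLast? = some litem := by
            rw [hitems, List.getLast?_eq_some_getLast (by simp)]
          rw [hgp]
          simp only [Option.bind_some, h2]
          simpa using hb
        exact pvRender_ne litem hpreitem hDitem (by injection h)
    have := pvMain grouped hg hlast
    unfold pvPop at this
    convert this using 2

theorem format_plain_changed : Claim_changed_format_plain := by
  unfold Claim_changed_format_plain; decide

theorem format_plain_tight : Claim_exact_format_plain := by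
  unfold Claim_exact_format_plain
  intro grouped _ _ hD
  cases hgl : grouped.getLast? with
  | none => unfold D_format_plain at hD; rw [hgl] at hD; simp at hD
  | some glast =>
  cases hgi : glast.2.getLast? with
  | none => unfold D_format_plain at hD; rw [hgl] at hD; simp [hgi] at hD
  | some litem =>
  have hDb : ((litem.lookup "rule_name" == some "") &&
      ((litem.lookup "code_function").getD "" == "")) = true := by
    unfold D_format_plain at hD; rw [hgl] at hD; simpa [hgi] using hD
  simp only [Bool.and_eq_true, beq_iff_eq] at hDb
  obtain ⟨hrn, hcf⟩ := hDb
  have hline : pvRender litem = "" := by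
    show (if (litem.lookup "code_function").getD "" ≠ "" then
        (litem.lookup "rule_name").getD "" ++ " (" ++ (litem.lookup "code_function").getD "" ++ ")"
      else (litem.lookup "rule_name").getD "") = ""
    rw [if_neg (by simp [hcf])]
    simp [hrn]
  have hgne : grouped ≠ [] := by intro h; rw [h] at hgl; simp at hgl
  have hine : glast.2 ≠ [] := by intro h; rw [h] at hgi; simp at hgi
  have hglast : grouped.getLast hgne = glast := by
    have := List.getLast?_eq_some_getLast hgne
    rw [hgl] at this; injection this with h; exact h.symm
  have hlitem : glast.2.getLast hine = litem := by
    have := List.getLast?_eq_some_getLast hine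
    rw [hgi] at this; injection this with h; exact h.symm
  have hflat : grouped.flatMap (fun gp => pvL gp ++ [""]) =
      (grouped.dropLast.flatMap (fun gp => pvL gp ++ [""]) ++
        ((glast.1 ++ ":") :: glast.2.dropLast.map pvRender)) ++ ["", ""] := by
    conv_lhs => rw [← List.dropLast_concat_getLast hgne, hglast]
    rw [List.flatMap_append]
    have hL : pvL glast = ((glast.1 ++ ":") :: glast.2.dropLast.map pvRender) ++ [""] := by
      unfold pvL
      conv_lhs => rw [← List.dropLast_concat_getLast hine, hlitem]
      simp [hline]
    simp [hL]
  set P := grouped.dropLast.flatMap (fun gp => pvL gp ++ [""]) ++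
      ((glast.1 ++ ":") :: glast.2.dropLast.map pvRender) with hP
  have hA : format_plain grouped = PySem.Str.join "\n" (pvPop P) := by
    show PySem.Str.join "\n" _ = _
    rw [pvLines_eq]
    show PySem.Str.join "\n" (pvPop (grouped.flatMap (fun gp => pvL gp ++ [""]))) = _
    rw [hflat, show (P ++ ["", ""]) = (P ++ [""]) ++ [""] by simp,
      pvPop_append_blank, pvPop_append_blank]
  have hB : format_plain_alt grouped = PySem.Str.join "\n" (P ++ [""]) := by
    unfold format_plain_alt
    rw [pvGo_eq_join]
    rw [pvAltMain grouped hgne, hflat,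
      show (P ++ ["", ""]) = (P ++ [""]) ++ [""] by simp, List.dropLast_concat]
  rw [hA, hB]
  intro heq
  have hpopne : pvPop P ≠ [] := by
    apply pvPop_ne_nil_of_mem P (glast.1 ++ ":")
    · rw [hP]; simp
    · exact pvHeader_ne _
  have hlen := congrArg (fun s => s.toList.length) heq
  simp only [] at hlen
  rw [pvJoin_len _ _ hpopne, pvJoin_len _ _ (by simp)] at hlen
  obtain ⟨R, hPdec, hRblank⟩ := pvPop_prefix_decomp P
  have hsum : (P.map (fun s => s.toList.length)).sum
      = ((pvPop P).map (fun s => s.toList.length)).sum := by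
    conv_lhs => rw [hPdec]
    rw [List.map_append, List.sum_append]
    have hz : (R.map (fun s => s.toList.length)).sum = 0 := by
      apply List.sum_eq_zero_iff_forall_eq_nat.mpr
      intro x hx
      obtain ⟨r, hr, rfl⟩ := List.mem_map.mp hx
      rw [hRblank r hr]
      rfl
    omega
  have hle : (pvPop P).length ≤ P.length := by
    conv_rhs => rw [hPdec]; rw [List.length_append]
    omega
  rw [List.map_append, List.sum_append, List.length_append] at hlen
  have h1 : (("\n" : String).toList).length = 1 := rfl
  have h2 : ((([""] : List String)).map (fun s => s.toList.length)).sum = 0 := rfl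
  rw [h1, h2] at hlen
  have hplen : 1 ≤ (pvPop P).length := by
    cases hPP : pvPop P with
    | nil => exact absurd hPP hpopne
    | cons a l => simp
  simp only [List.length_cons, List.length_nil] at hlen
  generalize hq1 : (List.map (fun s => s.toList.length) (pvPop P)).sum = sp at hlen hsum
  generalize hq2 : (List.map (fun s => s.toList.length) P).sum = sP at hlen hsum
  generalize hq3 : (pvPop P).length = np at hlen hle hplen
  generalize hq4 : P.length = nP at hlen hle
  omega
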